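-- pv_equiv track=rewrite | github.com/TATOAO/doc_visual_parsor | backend/document_analyzer.py | get_structure_summary
-- ===== SOURCE A (Python) =====
-- def get_structure_summary(structure):
--     """Get a summary of the document structure"""
--     if not structure:
--         return "No structure detected"
--
--     level_counts = {}
--     for item in structure:
--         level = item['level']
--         level_counts[level] = level_counts.get(level, 0) + 1
--
--     summary_parts = []
--     level_names = {1: "Main Headings", 2: "Sections", 3: "Subsections", 4: "Sub-subsections"}
--
--     for level in sorted(level_counts.keys()):
--         count = level_counts[level]
--         name = level_names.get(level, f"Level {level} headings")
--         summary_parts.append(f"{count} {name}")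
--
--     return ", ".join(summary_parts)
-- ===== SOURCE B (Python) =====
-- def get_structure_summary(structure):
--     """Get a summary of the document structure"""
--     if not structure:
--         return "No structure detected"
--
--     level_names = {1: "Main Headings", 2: "Sections", 3: "Subsections", 4: "Sub-subsections"}
--
--     levels = sorted(item['level'] for item in structure)
--     parts = []
--     i = 0
--     n = len(levels)
--     while i < n:
--         j = i
--         while j < n and levels[j] == levels[i]:
--             j += 1
--         lv = levels[i]
--         parts.append(f"{j - i} {level_names.get(lv, f'Level {lv} headings')}")
--         i = j
--     return ", ".join(parts)
-- ===== Notes on version B (the rewrite author's own statement) =====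
-- stated objective: alternative
-- what changed: Replaces A's dict-based counting pass plus sorted-keys pass by one sort of the extracted levels followed by a single run-length scan over the sorted list that emits each summary part directly.
import Mathlib
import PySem

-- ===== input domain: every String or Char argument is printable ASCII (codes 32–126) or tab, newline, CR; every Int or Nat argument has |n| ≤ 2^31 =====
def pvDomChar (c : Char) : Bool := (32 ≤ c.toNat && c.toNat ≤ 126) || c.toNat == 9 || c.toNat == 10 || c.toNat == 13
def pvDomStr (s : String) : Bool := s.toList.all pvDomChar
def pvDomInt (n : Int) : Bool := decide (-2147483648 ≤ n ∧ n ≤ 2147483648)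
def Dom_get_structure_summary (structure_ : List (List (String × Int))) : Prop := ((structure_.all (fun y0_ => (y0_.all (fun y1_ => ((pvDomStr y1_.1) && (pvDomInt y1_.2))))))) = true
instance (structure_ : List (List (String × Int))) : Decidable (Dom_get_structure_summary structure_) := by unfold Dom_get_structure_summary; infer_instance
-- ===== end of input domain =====

-- B replaces A's dict-counting pass + sorted-keys pass by one sort of the extracted levels
-- followed by a single run-length scan that emits each summary part directly (objective: alternative).

-- ===== PORT A =====
def get_structure_summary (structure_ : List (List (String × Int))) : String :=
  if structure_ = [] then "No structure detected"
  else
    let level_counts : PySem.Dict Int Int :=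
      structure_.foldl (fun d item =>
        -- item['level']: under Pre_ the key is present; `none` (KeyError) is excluded by Pre_
        let level := ((PySem.Dict.mk item).get? "level").getD 0
        d.insert level (d.getD level 0 + 1)) PySem.Dict.empty
    let level_names : PySem.Dict Int String :=
      PySem.Dict.mk [(1, "Main Headings"), (2, "Sections"), (3, "Subsections"), (4, "Sub-subsections")]
    let summary_parts : List String :=
      (PySem.List.sorted level_counts.keys (fun x => x)).foldl (fun acc level =>
        let count := level_counts.getD level 0
        let name := level_names.getD level ("Level " ++ PySem.Int.toStr level ++ " headings")
        acc ++ [PySem.Int.toStr count ++ " " ++ name]) []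
    PySem.Str.join ", " summary_parts

-- ===== PORT B =====
-- item['level'] of B's generator expression (under Pre_ the key is present; `none` = KeyError is excluded by Pre_)
def gss_level (item : List (String × Int)) : Int :=
  ((PySem.Dict.mk item).get? "level").getD 0

-- B's run-length scan over the sorted level list (the while/while index loop, as structural recursion:
-- the inner `while levels[j] == levels[i]` is the takeWhile run, `i = j` continues after it)
def gss_parts (level_names : PySem.Dict Int String) : List Int → List String
  | [] => []
  | x :: xs =>
    let run := xs.takeWhile (fun y => y == x)
    (PySem.Int.toStr ((run.length : Int) + 1) ++ " " ++
        level_names.getD x ("Level " ++ PySem.Int.toStr x ++ " headings"))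
      :: gss_parts level_names (xs.dropWhile (fun y => y == x))
termination_by l => l.length
decreasing_by
  have := List.length_dropWhile_le (fun y => y == x) xs
  simp; omega

def get_structure_summary_alt (structure_ : List (List (String × Int))) : String :=
  if structure_ = [] then "No structure detected"
  else
    let level_names : PySem.Dict Int String :=
      PySem.Dict.mk [(1, "Main Headings"), (2, "Sections"), (3, "Subsections"), (4, "Sub-subsections")]
    let levels := PySem.List.sorted (structure_.map gss_level) (fun x => x)
    PySem.Str.join ", " (gss_parts level_names levels)

-- ===== PRECONDITION & SPEC =====
-- Pre_ excludes exactly the items without a 'level' key, on which Python A (and Python B) raises KeyError.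
def Pre_get_structure_summary (structure_ : List (List (String × Int))) : Prop :=
  ∀ item ∈ structure_, (PySem.Dict.mk item).contains "level" = true

instance (structure_ : List (List (String × Int))) : Decidable (Pre_get_structure_summary structure_) := by
  unfold Pre_get_structure_summary; infer_instance

def pvWitness_get_structure_summary : (List (List (String × Int))) :=
  [[("level", 2)], [("level", 1)], [("title", 0), ("level", 1)]]

def Spec_get_structure_summary (structure_ : List (List (String × Int))) (out : String) : Prop := out = get_structure_summary_alt structure_
instance (structure_ : List (List (String × Int))) (out : String) : Decidable (Spec_get_structure_summary structure_ out) := by unfold Spec_get_structure_summary; infer_instance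

-- ===== CLAIM (what is proved, stated in full; the proofs are below) =====
def Claim_equal_get_structure_summary : Prop := ∀ (structure_ : List (List (String × Int))), Dom_get_structure_summary structure_ → Pre_get_structure_summary structure_ → Spec_get_structure_summary structure_ (get_structure_summary structure_)

-- ===== LEMMAS AND PROOFS =====

-- proof-side helper: the first elements of each run of the (sorted) level list = the distinct levels in order
def gss_runKeys : List Int → List Int
  | [] => []
  | x :: xs => x :: gss_runKeys (xs.dropWhile (fun y => y == x))
termination_by l => l.length
decreasing_by
  have := List.length_dropWhile_le (fun y => y == x) xs
  simp; omega

theorem gss_lt_of_mem_dropWhile (x : Int) (xs : List Int)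
    (h : (x :: xs).Pairwise (· ≤ ·)) :
    ∀ y ∈ xs.dropWhile (fun y => y == x), x < y := by
  induction xs with
  | nil => simp
  | cons a as ih =>
    rw [List.pairwise_cons] at h
    obtain ⟨hx, ha⟩ := h
    by_cases hax : a = x
    · subst hax
      rw [List.dropWhile_cons_of_pos (by simp)]
      exact ih (List.pairwise_cons.2 ⟨fun y hy => hx y (by simp [hy]), (List.pairwise_cons.1 ha).2⟩)
    · rw [List.dropWhile_cons_of_neg (by simp [hax])]
      intro y hy
      have hxa : x < a := lt_of_le_of_ne (hx a (by simp)) (Ne.symm hax)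
      rcases List.mem_cons.1 hy with rfl | hy
      · exact hxa
      · exact lt_of_lt_of_le hxa ((List.pairwise_cons.1 ha).1 y hy)

theorem gss_mem_runKeys (S : List Int) (hS : S.Pairwise (· ≤ ·)) (v : Int) :
    v ∈ gss_runKeys S ↔ v ∈ S := by
  match S with
  | [] => simp [gss_runKeys]
  | x :: xs =>
    rw [gss_runKeys]
    have hd : (xs.dropWhile (fun y => y == x)).Pairwise (· ≤ ·) :=
      hS.tail.sublist (List.dropWhile_sublist _)
    have ih := gss_mem_runKeys (xs.dropWhile (fun y => y == x)) hd v
    constructor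
    · intro hv
      rcases List.mem_cons.1 hv with rfl | hv
      · simp
      · exact List.mem_cons_of_mem x ((List.dropWhile_sublist _).mem (ih.1 hv))
    · intro hv
      rcases List.mem_cons.1 hv with rfl | hv
      · simp
      · by_cases hvx : v = x
        · simp [hvx]
        · right
          apply ih.2
          have hsplit : xs = xs.takeWhile (fun y => y == x) ++ xs.dropWhile (fun y => y == x) :=
            (List.takeWhile_append_dropWhile).symm
          rcases List.mem_append.1 (hsplit ▸ hv) with h1 | h2
          · exact absurd (by simpa using List.mem_takeWhile_imp h1) hvx
          · exact h2
termination_by S.length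
decreasing_by
  have := List.length_dropWhile_le (fun y => y == x) xs
  simp; omega

theorem gss_runKeys_pairwise_lt (S : List Int) (hS : S.Pairwise (· ≤ ·)) :
    (gss_runKeys S).Pairwise (· < ·) := by
  match S with
  | [] => simp [gss_runKeys]
  | x :: xs =>
    rw [gss_runKeys]
    have hd : (xs.dropWhile (fun y => y == x)).Pairwise (· ≤ ·) :=
      hS.tail.sublist (List.dropWhile_sublist _)
    refine List.pairwise_cons.2 ⟨?_, gss_runKeys_pairwise_lt _ hd⟩
    intro y hy
    exact gss_lt_of_mem_dropWhile x xs hS y ((gss_mem_runKeys _ hd y).1 hy)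
termination_by S.length
decreasing_by
  have := List.length_dropWhile_le (fun y => y == x) xs
  simp; omega

theorem gss_parts_eq (names : PySem.Dict Int String) (S : List Int) (hS : S.Pairwise (· ≤ ·)) :
    gss_parts names S = (gss_runKeys S).map (fun v =>
      PySem.Int.toStr ((S.count v : Int)) ++ " " ++
        names.getD v ("Level " ++ PySem.Int.toStr v ++ " headings")) := by
  match S with
  | [] => simp [gss_parts, gss_runKeys]
  | x :: xs =>
    have hd : (xs.dropWhile (fun y => y == x)).Pairwise (· ≤ ·) :=
      hS.tail.sublist (List.dropWhile_sublist _)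
    have hsplit : xs.takeWhile (fun y => y == x) ++ xs.dropWhile (fun y => y == x) = xs :=
      List.takeWhile_append_dropWhile
    have hrun : ∀ y ∈ xs.takeWhile (fun y => y == x), y = x := by
      intro y hy; simpa using List.mem_takeWhile_imp hy
    have hgt := gss_lt_of_mem_dropWhile x xs hS
    rw [gss_parts, gss_runKeys, List.map_cons,
        gss_parts_eq names (xs.dropWhile (fun y => y == x)) hd]
    congr 1
    · -- head part: the run length + 1 is the count of x in x :: xs
      congr 2
      have h1 : (xs.takeWhile (fun y => y == x)).count x = (xs.takeWhile (fun y => y == x)).length := by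
        rw [List.count_eq_length]; intro b hb; simpa using (hrun b hb).symm
      have h2 : (xs.dropWhile (fun y => y == x)).count x = 0 := by
        rw [List.count_eq_zero]; intro hx; exact absurd (hgt x hx) (lt_irrefl x)
      have h3 : (x :: xs).count x = xs.count x + 1 := by simp
      have h4 : xs.count x = (xs.takeWhile (fun y => y == x)).count x + (xs.dropWhile (fun y => y == x)).count x := by
        rw [← List.count_append, hsplit]
      congr 1
      omega
    · -- tail: counts agree for every key of the tail runs
      apply List.map_congr_left
      intro v hv
      have hvS' : v ∈ xs.dropWhile (fun y => y == x) := (gss_mem_runKeys _ hd v).1 hv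
      have hxv : x < v := hgt v hvS'
      have h1 : (xs.takeWhile (fun y => y == x)).count v = 0 := by
        rw [List.count_eq_zero]; intro hy
        exact absurd (hrun v hy) (by intro h; subst h; exact lt_irrefl v hxv)
      have hne : v ≠ x := by intro h; subst h; exact lt_irrefl v hxv
      have h2 : (x :: xs).count v = xs.count v := by
        simp [Ne.symm hne]
      have h4 : xs.count v = (xs.takeWhile (fun y => y == x)).count v + (xs.dropWhile (fun y => y == x)).count v := by
        rw [← List.count_append, hsplit]
      congr 2
      congr 1
      omega
termination_by S.length
decreasing_by
  have := List.length_dropWhile_le (fun y => y == x) xs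
  simp; omega

-- the two key lists coincide: sorted(distinct levels) = run heads of the sorted level list
theorem gss_keys_eq (L : List Int) :
    PySem.List.sorted (PySem.Set.ofList L) (fun x => x) =
      gss_runKeys (PySem.List.sorted L (fun x => x)) := by
  have hS : (PySem.List.sorted L (fun x => x)).Pairwise (· ≤ ·) :=
    PySem.List.sorted_pairwise L (fun x => x)
  have hlt := gss_runKeys_pairwise_lt _ hS
  apply PySem.List.sorted_eq_of_perm_of_pairwise_lt
  · rw [List.perm_ext_iff_of_nodup (hlt.imp ne_of_lt) (PySem.Set.nodup_ofList L)]
    intro a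
    rw [gss_mem_runKeys _ hS, PySem.List.mem_sorted, PySem.Set.mem_ofList]
  · exact hlt

-- ===== VERDICT (by name: the statement is the Claim_ definition above) =====
theorem get_structure_summary_spec : Claim_equal_get_structure_summary := by
  intro s _ _
  unfold Spec_get_structure_summary get_structure_summary get_structure_summary_alt
  by_cases hs : s = []
  · simp [hs]
  · rw [if_neg hs, if_neg hs]
    have hc : s.foldl (fun d item =>
        let level := ((PySem.Dict.mk item).get? "level").getD 0
        d.insert level (d.getD level 0 + 1)) PySem.Dict.empty =
        PySem.Dict.counter (s.map gss_level) := by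
      rw [← PySem.Dict.foldl_insert_getD_add_one_eq_counter, List.foldl_map]
      rfl
    simp only [hc, PySem.Dict.keys_counter, PySem.Dict.getD_counter,
      PySem.List.foldl_append_singleton_eq_map, List.nil_append]
    rw [gss_keys_eq, gss_parts_eq _ _ (PySem.List.sorted_pairwise _ _)]
    congr 1
    apply List.map_congr_left
    intro v _
    rw [(PySem.List.sorted_perm (s.map gss_level) (fun x => x) false).count_eq v]
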